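-- pv_equiv track=rewrite | github.com/paularcoleo/dailyprog | toHands.py | decodeHand
-- ===== SOURCE A (Python) =====
-- def decodeHand(hand, left=False):
--     count = 0
--     for i, digit in enumerate(hand):
--         if not (i == 0 or i == 1) and (hand[i] > hand[i-1]):
--             return None
--         count += 5*digit if i == 0 else digit
--     count *= 10 if left else 1
--     return count
-- ===== SOURCE B (Python) =====
-- def decodeHand(hand, left=False):
--     for i in range(2, len(hand)):
--         if hand[i] > hand[i - 1]:
--             return None
--     if hand:
--         count = 5 * hand[0] + sum(hand[1:])
--     else:
--         count = 0
--     return count * 10 if left else count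
-- ===== Notes on version B (the rewrite author's own statement) =====
-- stated objective: simpler
-- what changed: Replaces the single fused enumerate loop (accumulator interleaved with the ordering check) by two independent steps: an adjacent-pair validation scan over the indices from two, then a closed-form count of five times the first card plus the sum of the rest.
import Mathlib
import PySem

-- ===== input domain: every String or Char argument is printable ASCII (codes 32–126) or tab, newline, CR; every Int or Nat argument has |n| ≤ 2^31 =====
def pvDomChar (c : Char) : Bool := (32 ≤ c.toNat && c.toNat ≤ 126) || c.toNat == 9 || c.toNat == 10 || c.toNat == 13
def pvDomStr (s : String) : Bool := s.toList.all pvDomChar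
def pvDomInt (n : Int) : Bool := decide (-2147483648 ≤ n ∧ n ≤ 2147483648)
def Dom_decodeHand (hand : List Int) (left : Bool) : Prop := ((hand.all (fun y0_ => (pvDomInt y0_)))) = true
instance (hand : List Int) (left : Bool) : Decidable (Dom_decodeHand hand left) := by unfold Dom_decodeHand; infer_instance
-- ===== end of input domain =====

-- B replaces A's fused enumerate loop by a separate adjacent-pair validation scan plus a closed-form sum (objective: simpler).


-- ===== PORT A =====
-- A's loop over enumerate(hand): early `return None` = none; count accumulated in-state.
def decodeHandGo (hand : List Int) : List (Int × Int) → Int → Option Int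
  | [], count => some count
  | (i, digit) :: rest, count =>
    if ¬(i = 0 ∨ i = 1) ∧ PySem.List.pyGetD hand i 0 > PySem.List.pyGetD hand (i - 1) 0 then
      none
    else
      decodeHandGo hand rest (count + (if i = 0 then 5 * digit else digit))

def decodeHand (hand : List Int) (left : Bool) : Option Int :=
  match decodeHandGo hand (PySem.List.enumerate hand 0) 0 with
  | none => none
  | some count => some (count * (if left then 10 else 1))

-- ===== PORT B =====
def decodeHand_alt (hand : List Int) (left : Bool) : Option Int :=
  if (PySem.List.pyRange 2 (hand.length : Int) 1).any
      (fun i => decide (PySem.List.pyGetD hand i 0 > PySem.List.pyGetD hand (i - 1) 0)) then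
    none
  else
    let count : Int := match hand with
      | [] => 0
      | h :: t => 5 * h + t.sum
    some (if left then count * 10 else count)

-- ===== PRECONDITION & SPEC =====
def Spec_decodeHand (hand : List Int) (left : Bool) (out : Option Int) : Prop := out = decodeHand_alt hand left
instance (hand : List Int) (left : Bool) (out : Option Int) : Decidable (Spec_decodeHand hand left out) := by unfold Spec_decodeHand; infer_instance

-- ===== CLAIM (what is proved, stated in full; the proofs are below) =====
def Claim_equal_decodeHand : Prop := ∀ (hand : List Int) (left : Bool), Dom_decodeHand hand left → Spec_decodeHand hand left (decodeHand hand left)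

-- ===== LEMMAS AND PROOFS =====

-- The loop from index k ≥ 2 on: it is the validation-any over range(k, len) plus the plain sum of the dropped suffix.
theorem decodeHandGo_drop_aux (hand : List Int) (n : Nat) :
    ∀ (k : Nat) (c : Int), 2 ≤ k → hand.length - k = n →
    decodeHandGo hand (PySem.List.enumerate (hand.drop k) (k : Int)) c =
      if (PySem.List.pyRange (k : Int) (hand.length : Int) 1).any
          (fun i => decide (PySem.List.pyGetD hand i 0 > PySem.List.pyGetD hand (i - 1) 0)) then
        none
      else some (c + (hand.drop k).sum) := by
  induction n with
  | zero =>
    intro k c hk hn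
    have h1 : hand.drop k = [] := List.drop_eq_nil_of_le (by omega)
    have h2 : PySem.List.pyRange (k : Int) (hand.length : Int) 1 = [] :=
      PySem.List.pyRange_one_eq_nil (by exact_mod_cast (by omega : hand.length ≤ k))
    simp [h1, h2, decodeHandGo, PySem.List.enumerate_nil]
  | succ m ih =>
    intro k c hk hn
    have hlt : k < hand.length := by omega
    have hdrop : hand.drop k = hand[k] :: hand.drop (k + 1) := List.drop_eq_getElem_cons hlt
    rw [hdrop, PySem.List.enumerate_cons,
        PySem.List.pyRange_one_cons (by exact_mod_cast hlt), List.any_cons]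
    simp only [decodeHandGo]
    have hne : ¬((k : Int) = 0 ∨ (k : Int) = 1) := by omega
    by_cases hcmp : PySem.List.pyGetD hand (k : Int) 0 > PySem.List.pyGetD hand ((k : Int) - 1) 0
    · rw [if_pos ⟨hne, hcmp⟩, decide_eq_true hcmp]
      simp
    · have hrec := ih (k + 1) (c + hand[k]) (by omega) (by omega)
      push_cast at hrec
      rw [if_neg (fun h => hcmp h.2), if_neg (by omega : ¬ (k : Int) = 0), hrec,
        decide_eq_false hcmp]
      simp only [Bool.false_or]
      by_cases hany : (PySem.List.pyRange ((k : Int) + 1) (hand.length : Int) 1).any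
          (fun i => decide (PySem.List.pyGetD hand i 0 > PySem.List.pyGetD hand (i - 1) 0)) = true
      · rw [if_pos hany, if_pos hany]
      · rw [if_neg hany, if_neg hany]
        simp only [List.sum_cons]
        congr 1
        ring

theorem decodeHandGo_drop (hand : List Int) (k : Nat) (c : Int) (hk : 2 ≤ k) :
    decodeHandGo hand (PySem.List.enumerate (hand.drop k) (k : Int)) c =
      if (PySem.List.pyRange (k : Int) (hand.length : Int) 1).any
          (fun i => decide (PySem.List.pyGetD hand i 0 > PySem.List.pyGetD hand (i - 1) 0)) then
        none
      else some (c + (hand.drop k).sum) :=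
  decodeHandGo_drop_aux hand (hand.length - k) k c hk rfl

theorem decodeHand_eq_alt (hand : List Int) (left : Bool) :
    decodeHand hand left = decodeHand_alt hand left := by
  match hand with
  | [] =>
    simp [decodeHand, decodeHand_alt, decodeHandGo, PySem.List.enumerate_nil,
      PySem.List.pyRange_one_eq_nil (by norm_num : ((([] : List Int).length : Int)) ≤ 2)]
  | [x] =>
    have h2 : PySem.List.pyRange 2 (([x] : List Int).length : Int) 1 = [] :=
      PySem.List.pyRange_one_eq_nil (by norm_num)
    simp [decodeHand, decodeHand_alt, decodeHandGo, PySem.List.enumerate_cons,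
      PySem.List.enumerate_nil, h2]
  | x :: y :: t =>
    have hgo := decodeHandGo_drop (x :: y :: t) 2 (0 + 5 * x + y) (le_refl 2)
    simp only [List.drop_succ_cons, List.drop_zero, Nat.cast_ofNat] at hgo
    simp only [decodeHand, PySem.List.enumerate_cons, decodeHandGo]
    rw [if_neg (by simp), if_neg (by simp)]
    rw [if_pos trivial, if_neg (by norm_num : ¬(0:Int) + 1 = 0)]
    rw [show (0:Int)+1+1 = 2 from by norm_num]
    rw [hgo]
    by_cases hany : ((PySem.List.pyRange 2 ((x :: y :: t).length : Int) 1).any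
        (fun i => decide (PySem.List.pyGetD (x :: y :: t) i 0 > PySem.List.pyGetD (x :: y :: t) (i - 1) 0))) = true
    · rw [if_pos hany]
      simp only [decodeHand_alt]
      rw [if_pos hany]
    · rw [if_neg hany]
      simp only [decodeHand_alt]
      rw [if_neg hany]
      simp only [List.sum_cons, Option.some.injEq]
      cases left <;> simp only [Bool.false_eq_true, if_true, if_false, ite_true, ite_false] <;> ring

-- ===== VERDICT (by name: the statement is the Claim_ definition above) =====
theorem decodeHand_spec : Claim_equal_decodeHand := by
  intro hand left _
  unfold Spec_decodeHand
  exact decodeHand_eq_alt hand left
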